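-- pv_equiv track=rewrite | github.com/EmanueleMusumeci/GeneticAlgorithmsLibrary | modules/utils.py | get_null_fields
-- ===== SOURCE A (Python) =====
-- def get_null_fields(data, labels, null_symbol = "#NULL!"):
--     null_fields = []
--     for (i, field) in labels:
--         all_null = True
--         for j, sample in enumerate(data):
--             if data[j][i] != null_symbol:
--                 all_null = False
--                 break
--         if all_null:
--             null_fields.append((i, field))
--
--     return null_fields
-- ===== SOURCE B (Python) =====
-- def get_null_fields(data, labels, null_symbol="#NULL!"):
--     candidates = {i for (i, field) in labels}
--     for row in data:
--         if not candidates: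
--             break
--         for (i, field) in labels:
--             if i in candidates and row[i] != null_symbol:
--                 candidates.discard(i)
--     return [(i, field) for (i, field) in labels if i in candidates]
-- ===== Notes on version B (the rewrite author's own statement) =====
-- stated objective: alternative
-- what changed: Inverted the traversal: a row-major pass maintaining a shrinking candidate set of column indices (reading row[i] only while i is still a candidate, and stopping when the set empties), then a single filter over labels, replacing A's per-label column scan with early break.
import Mathlib
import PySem

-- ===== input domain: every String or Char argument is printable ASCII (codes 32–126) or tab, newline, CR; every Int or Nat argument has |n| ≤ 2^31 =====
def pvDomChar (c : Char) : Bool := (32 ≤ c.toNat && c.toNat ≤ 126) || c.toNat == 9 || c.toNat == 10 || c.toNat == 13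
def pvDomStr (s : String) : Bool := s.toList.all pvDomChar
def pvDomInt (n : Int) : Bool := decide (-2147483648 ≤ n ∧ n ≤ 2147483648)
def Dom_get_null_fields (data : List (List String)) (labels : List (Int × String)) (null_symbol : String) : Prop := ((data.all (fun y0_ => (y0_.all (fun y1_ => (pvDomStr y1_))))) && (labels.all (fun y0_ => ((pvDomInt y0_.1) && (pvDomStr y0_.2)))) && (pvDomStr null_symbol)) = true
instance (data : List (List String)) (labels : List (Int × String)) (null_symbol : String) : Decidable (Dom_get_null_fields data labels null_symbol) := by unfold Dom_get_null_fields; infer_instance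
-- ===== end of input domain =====

-- B inverts the traversal: one row-major pass over a shrinking candidate set of
-- column indices, then one filter over labels (objective: alternative decomposition, same cost).

-- ===== PORT A =====
-- A's inner loop: scan rows in order, break with False on the first row whose i-th
-- entry differs from null_symbol (out-of-range access = IndexError, excluded by Pre_;
-- the port returns false there, a value never relied on inside Pre_).
def pvScanAllNull (data : List (List String)) (i : Int) (null_symbol : String) : Bool :=
  match data with
  | [] => true
  | row :: rest =>
    match PySem.List.pyGet? row i with
    | none => false
    | some v => if v ≠ null_symbol then false else pvScanAllNull rest i null_symbol

def get_null_fields (data : List (List String)) (labels : List (Int × String)) (null_symbol : String) : List (Int × String) :=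
  labels.foldl (fun null_fields p =>
    if pvScanAllNull data p.1 null_symbol then null_fields ++ [p] else null_fields) []

-- ===== PORT B =====
-- inner 'for (i, field) in labels: if i in candidates and row[i] != null_symbol: candidates.discard(i)';
-- row[i] is read only while i is a candidate, so pyGetD with default null_symbol is
-- exact under Pre_ (the read index is then always in range).
def pvRowUpdate (cands : PySem.Set Int) (labels : List (Int × String)) (row : List String) (null_symbol : String) : PySem.Set Int :=
  labels.foldl (fun c p =>
    if PySem.Set.contains c p.1 && (PySem.List.pyGetD row p.1 null_symbol != null_symbol)
    then PySem.Set.discard c p.1 else c) cands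

-- 'for row in data: if not candidates: break; <inner loop>'
def pvRowsLoop (data : List (List String)) (labels : List (Int × String)) (null_symbol : String) (cands : PySem.Set Int) : PySem.Set Int :=
  match data with
  | [] => cands
  | row :: rest =>
    if cands.isEmpty then cands
    else pvRowsLoop rest labels null_symbol (pvRowUpdate cands labels row null_symbol)

def get_null_fields_alt (data : List (List String)) (labels : List (Int × String)) (null_symbol : String) : List (Int × String) :=
  let candidates := pvRowsLoop data labels null_symbol (PySem.Set.ofList (labels.map Prod.fst))
  labels.filter (fun p => PySem.Set.contains candidates p.1)

-- ===== PRECONDITION & SPEC =====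
-- Pre_ excludes exactly the inputs on which A raises IndexError (and B raises too):
-- some label index i is out of range for a row of data while every earlier row has an
-- in-range, null entry at i, so A's column scan reaches the bad access before breaking.
def Pre_get_null_fields (data : List (List String)) (labels : List (Int × String)) (null_symbol : String) : Prop :=
  ∀ p ∈ labels, ∀ k, k < data.length →
    (∀ row ∈ data.take k, PySem.Raise.InRange row.length p.1 ∧ PySem.List.pyGetD row p.1 null_symbol = null_symbol) →
    PySem.Raise.InRange (data.getD k []).length p.1
instance (data : List (List String)) (labels : List (Int × String)) (null_symbol : String) : Decidable (Pre_get_null_fields data labels null_symbol) := by unfold Pre_get_null_fields; infer_instance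

def pvWitness_get_null_fields : List (List String) × (List (Int × String)) × String :=
  ([["x", "x", "x"], []], [(0, "a"), (1, "b"), (-1, "c")], "#NULL!")

def Spec_get_null_fields (data : List (List String)) (labels : List (Int × String)) (null_symbol : String) (out : List (Int × String)) : Prop := out = get_null_fields_alt data labels null_symbol
instance (data : List (List String)) (labels : List (Int × String)) (null_symbol : String) (out : List (Int × String)) : Decidable (Spec_get_null_fields data labels null_symbol out) := by unfold Spec_get_null_fields; infer_instance

-- ===== CLAIM (what is proved, stated in full; the proofs are below) =====
def Claim_equal_get_null_fields : Prop := ∀ (data : List (List String)) (labels : List (Int × String)) (null_symbol : String), Dom_get_null_fields data labels null_symbol → Pre_get_null_fields data labels null_symbol → Spec_get_null_fields data labels null_symbol (get_null_fields data labels null_symbol)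

-- ===== LEMMAS AND PROOFS =====

-- membership after B's inner loop over labels on one row
theorem mem_pvRowUpdate (cands : PySem.Set Int) (labels : List (Int × String)) (row : List String) (ns : String) (x : Int) :
    x ∈ pvRowUpdate cands labels row ns ↔
      x ∈ cands ∧ ∀ p ∈ labels, p.1 = x → PySem.List.pyGetD row x ns = ns := by
  induction labels generalizing cands with
  | nil => simp [pvRowUpdate]
  | cons q qs ih =>
    have step : pvRowUpdate cands (q :: qs) row ns =
        pvRowUpdate (if PySem.Set.contains cands q.1 && (PySem.List.pyGetD row q.1 ns != ns)
          then PySem.Set.discard cands q.1 else cands) qs row ns := rfl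
    rw [step, ih]
    split_ifs with h
    · simp only [Bool.and_eq_true, bne_iff_ne, ne_eq] at h
      obtain ⟨hc, hne⟩ := h
      simp only [PySem.Set.mem_discard, List.mem_cons, ne_eq]
      constructor
      · rintro ⟨⟨hx, hxq⟩, hall⟩
        exact ⟨hx, fun p hp hpx => by
          rcases hp with rfl | hp
          · exact absurd hpx.symm hxq
          · exact hall p hp hpx⟩
      · rintro ⟨hx, hall⟩
        refine ⟨⟨hx, fun hxq => ?_⟩, fun p hp hpx => hall p (Or.inr hp) hpx⟩
        exact hne (by rw [← hxq]; exact hall q (Or.inl rfl) hxq.symm)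
    · simp only [Bool.and_eq_true, bne_iff_ne, ne_eq, not_and, not_not] at h
      simp only [List.mem_cons]
      constructor
      · rintro ⟨hx, hall⟩
        refine ⟨hx, fun p hp hpx => ?_⟩
        rcases hp with rfl | hp
        · by_cases hc : PySem.Set.contains cands p.1 = true
          · rw [← hpx]; exact h hc
          · rw [PySem.Set.contains_iff] at hc
            subst hpx; exact absurd hx hc
        · exact hall p hp hpx
      · rintro ⟨hx, hall⟩
        exact ⟨hx, fun p hp hpx => hall p (Or.inr hp) hpx⟩

-- membership after B's whole row loop (the 'break' on an empty set is invisible to membership)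
theorem mem_pvRowsLoop (data : List (List String)) (labels : List (Int × String)) (ns : String) (cands : PySem.Set Int) (x : Int) :
    x ∈ pvRowsLoop data labels ns cands ↔
      x ∈ cands ∧ ∀ row ∈ data, ∀ p ∈ labels, p.1 = x → PySem.List.pyGetD row x ns = ns := by
  induction data generalizing cands with
  | nil => simp [pvRowsLoop]
  | cons r rs ih =>
    simp only [pvRowsLoop]
    split_ifs with hemp
    · have : cands = [] := List.isEmpty_iff.mp hemp
      subst this; simp
    · rw [ih, mem_pvRowUpdate]
      constructor
      · rintro ⟨⟨hx, hr⟩, hrest⟩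
        refine ⟨hx, fun row hrow => ?_⟩
        rcases List.mem_cons.mp hrow with rfl | hrow
        · exact hr
        · exact hrest row hrow
      · rintro ⟨hx, hall⟩
        exact ⟨⟨hx, hall r (List.mem_cons_self)⟩, fun row hrow => hall row (List.mem_cons_of_mem _ hrow)⟩

-- A's scan characterised, given Pre_'s per-column condition
theorem pvScanAllNull_iff (data : List (List String)) (i : Int) (ns : String)
    (h : ∀ k, k < data.length →
      (∀ row ∈ data.take k, PySem.Raise.InRange row.length i ∧ PySem.List.pyGetD row i ns = ns) →
      PySem.Raise.InRange (data.getD k []).length i) :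
    pvScanAllNull data i ns = true ↔ ∀ row ∈ data, PySem.List.pyGetD row i ns = ns := by
  induction data with
  | nil => simp [pvScanAllNull]
  | cons r rs ih =>
    have hr : PySem.Raise.InRange r.length i := by
      have := h 0 (by simp) (by simp)
      simpa using this
    have hget : PySem.List.pyGet? r i = some (PySem.List.pyGetD r i ns) := by
      cases hg : PySem.List.pyGet? r i with
      | none => exact absurd hr ((PySem.List.pyGet?_eq_none_iff r i).mp hg)
      | some v => simp [PySem.List.pyGetD, hg]
    simp only [pvScanAllNull, hget]
    by_cases hv : PySem.List.pyGetD r i ns = ns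
    · simp only [hv, ne_eq, not_true_eq_false, if_neg, not_false_iff]
      have h' : ∀ k, k < rs.length →
          (∀ row ∈ rs.take k, PySem.Raise.InRange row.length i ∧ PySem.List.pyGetD row i ns = ns) →
          PySem.Raise.InRange (rs.getD k []).length i := by
        intro k hk hpre
        have := h (k + 1) (by simpa using Nat.succ_lt_succ hk) ?_
        · simpa using this
        · intro row hrow
          rcases List.mem_cons.mp (by simpa [List.take_succ_cons] using hrow) with rfl | hrow'
          · exact ⟨hr, hv⟩
          · exact hpre row hrow'
      rw [ih h']
      constructor
      · intro hall row hrow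
        rcases List.mem_cons.mp hrow with rfl | hrow
        · exact hv
        · exact hall row hrow
      · intro hall row hrow; exact hall row (List.mem_cons_of_mem _ hrow)
    · simp only [ne_eq, hv, not_false_iff, if_pos]
      constructor
      · intro hc; exact absurd hc (by simp)
      · intro hall; exact absurd (hall r (List.mem_cons_self)) hv

-- ===== VERDICT (by name: the statement is the Claim_ definition above) =====
theorem get_null_fields_spec : Claim_equal_get_null_fields := by
  intro data labels null_symbol _ hpre
  show get_null_fields data labels null_symbol = get_null_fields_alt data labels null_symbol
  unfold get_null_fields get_null_fields_alt
  rw [show (fun (null_fields : List (Int × String)) p =>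
        if pvScanAllNull data p.1 null_symbol then null_fields ++ [p] else null_fields) =
      (fun acc p => if pvScanAllNull data p.1 null_symbol then acc ++ [id p] else acc) from rfl,
    PySem.List.foldl_append_if]
  simp only [List.nil_append, List.map_id]
  apply List.filter_congr
  intro p hp
  rw [Bool.eq_iff_iff, PySem.Set.contains_iff,
    pvScanAllNull_iff data p.1 null_symbol (hpre p hp), mem_pvRowsLoop]
  constructor
  · intro hall
    refine ⟨(PySem.Set.mem_ofList _ _).mpr (List.mem_map_of_mem hp), fun row hrow q hq hqx => hall row hrow⟩
  · intro ⟨_, hall⟩ row hrow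
    exact hall row hrow p hp rfl
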